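-- pv_equiv track=rewrite | github.com/zeke-jeske/tandem-index | misc/index_formatter_final.py | split_term_and_pages
-- ===== SOURCE A (Python) =====
-- from typing import List, Tuple, Dict, Optional
--
-- def split_term_and_pages(line: str) -> Tuple[str, str]:
--     """
--     Split a line into term and page numbers.
--     This handles cases where the term itself might contain commas.
--     """
--     line = line.strip()
--     if not line:
--         return "", ""
--
--     # Split by commas and check from the end to find where page numbers start
--     parts = [part.strip() for part in line.split(',')]
--
--     # Find the longest suffix that consists only of page numbers
--     page_parts = []
--     term_parts = []
--
--     # Start from the end and collect page numbers
--     for i in range(len(parts) - 1, -1, -1):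
--         part = parts[i]
--         # Check if this part is a page number (digits only)
--         if part.isdigit():
--             page_parts.insert(0, part)
--         else:
--             # Once we hit a non-page-number, everything from here to the start is the term
--             term_parts = parts[:i+1]
--             break
--
--     # If we didn't find any clear page numbers, treat the whole thing as a term
--     if not page_parts:
--         return line, ""
--
--     term = ", ".join(term_parts) if term_parts else ""
--     pages = ", ".join(page_parts)
--
--     return term, pages
-- ===== SOURCE B (Python) =====
-- def split_term_and_pages(line):
--     """Forward single pass: record the cut point just after the last non-digit part."""
--     line = line.strip()
--     if not line:
--         return "", ""
--     parts = [p.strip() for p in line.split(',')]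
--     cut = 0
--     for i, p in enumerate(parts):
--         if not p.isdigit():
--             cut = i + 1
--     page_parts = parts[cut:]
--     if not page_parts:
--         return line, ""
--     return ", ".join(parts[:cut]), ", ".join(page_parts)
-- ===== Notes on version B (the rewrite author's own statement) =====
-- stated objective: simpler
-- what changed: Replaced A's backward scan with break plus insert(0) page accumulation by a single forward pass that records the cut point after the last non-digit part and slices the parts list once.
import Mathlib
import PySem

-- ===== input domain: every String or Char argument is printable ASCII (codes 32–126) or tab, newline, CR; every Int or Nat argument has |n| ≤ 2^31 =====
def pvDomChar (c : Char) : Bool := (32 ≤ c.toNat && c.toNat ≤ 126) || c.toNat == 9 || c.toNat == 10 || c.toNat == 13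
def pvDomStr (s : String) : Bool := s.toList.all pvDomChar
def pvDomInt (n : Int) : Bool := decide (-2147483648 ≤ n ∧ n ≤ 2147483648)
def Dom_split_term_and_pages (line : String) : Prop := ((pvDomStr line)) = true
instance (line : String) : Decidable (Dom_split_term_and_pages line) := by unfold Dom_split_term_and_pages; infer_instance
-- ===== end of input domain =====

-- B replaces A's backward scan-with-break by a single forward pass recording the cut point
-- after the last non-digit part (objective: simpler).

-- ===== PORT A =====
-- the backward for-loop of A: i counts how many leading parts are still unvisited;
-- pages is page_parts (insert(0,·) = cons while walking down); break returns parts[:i+1]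
def aLoop (parts : List String) : Nat → List String → List String × List String
  | 0, pages => ([], pages)
  | i+1, pages =>
    let part := parts.getD i ""
    if PySem.Str.strIsdigit part then aLoop parts i (part :: pages)
    else (parts.take (i+1), pages)   -- parts[:i+1], exact for 0 ≤ i+1

def split_term_and_pages (line : String) : String × String :=
  let line := PySem.Str.strip line
  if line = "" then ("", "")
  else
    let parts := ((PySem.Str.split? line ",").getD []).map PySem.Str.strip  -- sep "," ≠ "" so split? is always some; getD only unwraps
    let tp := aLoop parts parts.length []
    let term_parts := tp.1
    let page_parts := tp.2
    if page_parts = [] then (line, "")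
    else
      let term := if term_parts ≠ [] then PySem.Str.join ", " term_parts else ""
      let pages := PySem.Str.join ", " page_parts
      (term, pages)

-- ===== PORT B =====
-- cut = index just after the last non-digit part (0 if every part is a digit string)
def cutOf (parts : List String) : Int :=
  (PySem.List.enumerate parts 0).foldl
    (fun cut ip => if PySem.Str.strIsdigit ip.2 then cut else ip.1 + 1) 0

def split_term_and_pages_alt (line : String) : String × String :=
  let line := PySem.Str.strip line
  if line = "" then ("", "")
  else
    let parts := ((PySem.Str.split? line ",").getD []).map PySem.Str.strip  -- sep "," ≠ "" so split? is always some; getD only unwraps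
    let cut := cutOf parts
    let page_parts := PySem.List.slice parts (some cut) none
    if page_parts = [] then (line, "")
    else (PySem.Str.join ", " (PySem.List.slice parts none (some cut)),
          PySem.Str.join ", " page_parts)

-- ===== PRECONDITION & SPEC =====
def Spec_split_term_and_pages (line : String) (out : String × String) : Prop := out = split_term_and_pages_alt line
instance (line : String) (out : String × String) : Decidable (Spec_split_term_and_pages line out) := by unfold Spec_split_term_and_pages; infer_instance

-- ===== CLAIM (what is proved, stated in full; the proofs are below) =====
def Claim_equal_split_term_and_pages : Prop := ∀ (line : String), Dom_split_term_and_pages line → Spec_split_term_and_pages line (split_term_and_pages line)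

-- ===== LEMMAS AND PROOFS =====

lemma cutOf_nil : cutOf [] = 0 := rfl

lemma cutOf_snoc (l : List String) (p : String) :
    cutOf (l ++ [p]) = if PySem.Str.strIsdigit p then cutOf l else (l.length : Int) + 1 := by
  unfold cutOf
  rw [PySem.List.enumerate_append, List.foldl_append]
  simp [PySem.List.enumerate]

lemma cutOf_nonneg (l : List String) : 0 ≤ cutOf l ∧ cutOf l ≤ l.length := by
  induction l using List.reverseRecOn with
  | nil => simp [cutOf_nil]
  | append_singleton l p ih =>
    rw [cutOf_snoc]
    split_ifs <;> simp <;> omega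

lemma aLoop_eq (parts : List String) (i : Nat) (hi : i ≤ parts.length) (pages : List String) :
    aLoop parts i pages =
      (parts.take (cutOf (parts.take i)).toNat,
       (parts.take i).drop (cutOf (parts.take i)).toNat ++ pages) := by
  induction i generalizing pages with
  | zero => simp [aLoop, cutOf_nil]
  | succ i ih =>
    have hlt : i < parts.length := hi
    have htake : parts.take (i+1) = parts.take i ++ [parts[i]] := by
      rw [List.take_add_one]
      simp [List.getElem?_eq_getElem hlt]
    have hgetD : parts.getD i "" = parts[i] := by
      simp [List.getD, List.getElem?_eq_getElem hlt]
    have hc := cutOf_nonneg (parts.take i)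
    have hlen : (parts.take i).length = i := by simp [Nat.min_eq_left (le_of_lt hlt)]
    unfold aLoop
    simp only [hgetD]
    by_cases hd : PySem.Str.strIsdigit parts[i]
    · rw [if_pos hd, ih (le_of_lt hlt)]
      have hcut : cutOf (parts.take (i+1)) = cutOf (parts.take i) := by
        rw [htake, cutOf_snoc, if_pos hd]
      rw [hcut, htake]
      have hle : (cutOf (parts.take i)).toNat ≤ (parts.take i).length := by omega
      rw [List.drop_append_of_le_length hle]
      simp
    · rw [if_neg hd]
      have hcut : cutOf (parts.take (i+1)) = (i : Int) + 1 := by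
        rw [htake, cutOf_snoc, if_neg hd, hlen]
      rw [hcut]
      have h1 : ((i : Int) + 1).toNat = i + 1 := by omega
      rw [h1]
      have hlen1 : (parts.take (i+1)).length = i + 1 := by
        simp [Nat.min_eq_left hi]
      rw [List.drop_eq_nil_of_le (le_of_eq hlen1)]
      simp

lemma aLoop_main (parts : List String) :
    aLoop parts parts.length [] =
      (parts.take (cutOf parts).toNat, parts.drop (cutOf parts).toNat) := by
  rw [aLoop_eq parts parts.length (le_refl _) []]
  simp

lemma join_empty_cases (l : List String) :
    (if l ≠ [] then PySem.Str.join ", " l else "") = PySem.Str.join ", " l := by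
  by_cases h : l = []
  · subst h; rfl
  · rw [if_pos h]

-- ===== VERDICT (by name: the statement is the Claim_ definition above) =====
theorem split_term_and_pages_spec : Claim_equal_split_term_and_pages := by
  intro line _
  unfold Spec_split_term_and_pages split_term_and_pages split_term_and_pages_alt
  by_cases hempty : PySem.Str.strip line = ""
  · simp only [hempty, reduceIte]
  · simp only [if_neg hempty]
    set parts := ((PySem.Str.split? (PySem.Str.strip line) ",").getD []).map PySem.Str.strip with hparts
    clear_value parts
    have hc := cutOf_nonneg parts
    rw [aLoop_main]
    rw [PySem.List.slice_from parts hc.1, PySem.List.slice_to parts hc.1]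
    dsimp only
    by_cases hp : List.drop (cutOf parts).toNat parts = []
    · rw [if_pos hp, if_pos hp]
    · rw [if_neg hp, if_neg hp, join_empty_cases]
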